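-- pv_equiv track=rewrite | github.com/muru4a/python | Leetcode/zigzag.py | solution
-- ===== SOURCE A (Python) =====
-- def solution(numbers):
--     result = []
--     for i in range(len(numbers)-2):
--         if numbers[i] < numbers[i+1] >  numbers[i+2]:
--            result.append(1)
--         elif numbers[i] > numbers[i+1] < numbers[i+2]:
--             result.append(1)
--         elif numbers[i] < numbers[i+1] < numbers[i+2]:
--             result.append(0)
--     return result
-- ===== SOURCE B (Python) =====
-- def solution(numbers):
--     # Run-length encode the adjacent-comparison signs, then emit one 1 per boundary
--     # between two opposite strict runs and k-1 zeros per strictly-increasing run of k steps.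
--     signs = [(a < b) - (a > b) for a, b in zip(numbers, numbers[1:])]
--     out = []
--     prev = 0
--     for s, k in _rle(signs):
--         if prev and s and prev != s:
--             out.append(1)
--         if s == 1:
--             out.extend([0] * (k - 1))
--         prev = s
--     return out
--
-- def _rle(xs):
--     # two-pointer grouping of equal consecutive values into (value, run length) pairs
--     runs = []
--     i = 0
--     n = len(xs)
--     while i < n:
--         j = i + 1
--         while j < n and xs[j] == xs[i]:
--             j += 1
--         runs.append((xs[i], j - i))
--         i = j
--     return runs
-- ===== Notes on version B (the rewrite author's own statement) =====
-- stated objective: alternative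
-- what changed: B run-length encodes the list of adjacent-comparison signs and then emits, per run, one 1 at each boundary between opposite strict runs and k-1 zeros for a strictly-increasing run of k steps, instead of A's per-index sliding window over triples.
import Mathlib
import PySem

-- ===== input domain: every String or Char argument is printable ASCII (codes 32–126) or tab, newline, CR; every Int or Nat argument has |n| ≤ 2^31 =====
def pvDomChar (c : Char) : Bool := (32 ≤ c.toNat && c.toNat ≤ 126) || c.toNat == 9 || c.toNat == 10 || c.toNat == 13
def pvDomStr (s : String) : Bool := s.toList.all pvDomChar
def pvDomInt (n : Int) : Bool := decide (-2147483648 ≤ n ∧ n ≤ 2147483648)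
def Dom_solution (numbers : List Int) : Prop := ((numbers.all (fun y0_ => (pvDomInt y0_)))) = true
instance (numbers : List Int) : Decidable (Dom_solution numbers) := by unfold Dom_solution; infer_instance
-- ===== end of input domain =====

-- B replaces A's sliding triple window by run-length encoding of the adjacent-comparison
-- signs, emitting per run/boundary (objective: alternative algorithm, same cost).

-- ===== PORT A =====
-- for i in range(len(numbers)-2): indices i, i+1, i+2 are always in range, so pyGetD's default is unreachable
def solution (numbers : List Int) : List Int :=
  (PySem.List.pyRange 0 (PySem.List.len numbers - 2) 1).foldl
    (fun result i =>
      if PySem.List.pyGetD numbers i 0 < PySem.List.pyGetD numbers (i + 1) 0 ∧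
         PySem.List.pyGetD numbers (i + 2) 0 < PySem.List.pyGetD numbers (i + 1) 0 then result ++ [1]
      else if PySem.List.pyGetD numbers (i + 1) 0 < PySem.List.pyGetD numbers i 0 ∧
              PySem.List.pyGetD numbers (i + 1) 0 < PySem.List.pyGetD numbers (i + 2) 0 then result ++ [1]
      else if PySem.List.pyGetD numbers i 0 < PySem.List.pyGetD numbers (i + 1) 0 ∧
              PySem.List.pyGetD numbers (i + 1) 0 < PySem.List.pyGetD numbers (i + 2) 0 then result ++ [0]
      else result) []

-- ===== PORT B =====
-- _rle: the outer while loop advances i run by run (ported as recursion over the suffix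
-- xs[i:]); the inner while loop counts the equal prefix (ported as takeWhile, exact for it)
def pvRle : List Int → List (Int × Int)
  | [] => []
  | x :: t =>
    let pre := t.takeWhile (fun y => y == x)
    (x, 1 + (pre.length : Int)) :: pvRle (t.drop pre.length)
termination_by xs => xs.length
decreasing_by simp [List.length_drop]

-- (a < b) - (a > b) on Python bools
def pvSignB (a b : Int) : Int := (if a < b then (1 : Int) else 0) - (if b < a then 1 else 0)

def solution_alt (numbers : List Int) : List Int :=
  let signs := (numbers.zip (PySem.List.slice numbers (some 1) none)).map (fun p => pvSignB p.1 p.2)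
  ((pvRle signs).foldl
    (fun (st : List Int × Int) r =>
      let out1 := if st.2 ≠ 0 ∧ r.1 ≠ 0 ∧ st.2 ≠ r.1 then st.1 ++ [1] else st.1
      let out2 := if r.1 = 1 then out1 ++ List.replicate (r.2 - 1).toNat 0 else out1
      (out2, r.1)) ([], 0)).1

-- ===== PRECONDITION & SPEC =====
def Spec_solution (numbers : List Int) (out : List Int) : Prop := out = solution_alt numbers
instance (numbers : List Int) (out : List Int) : Decidable (Spec_solution numbers out) := by unfold Spec_solution; infer_instance

-- ===== CLAIM (what is proved, stated in full; the proofs are below) =====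
def Claim_equal_solution : Prop := ∀ (numbers : List Int), Dom_solution numbers → Spec_solution numbers (solution numbers)

-- ===== LEMMAS AND PROOFS =====

-- what A appends for one triple (x, y, z)
def pvTrip (x y z : Int) : List Int :=
  if x < y ∧ z < y then [1] else if y < x ∧ y < z then [1] else if x < y ∧ y < z then [0] else []

-- A's loop body at index i
def pvG (xs : List Int) (i : Int) : List Int :=
  pvTrip (PySem.List.pyGetD xs i 0) (PySem.List.pyGetD xs (i + 1) 0) (PySem.List.pyGetD xs (i + 2) 0)

-- what one sign pair (a, b) contributes
def pvPair (a b : Int) : List Int :=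
  if a ≠ 0 ∧ b ≠ 0 ∧ a ≠ b then [1] else if a = 1 ∧ b = 1 then [0] else []

-- common structural recursion over consecutive triples
def pvZig : List Int → List Int
  | x :: y :: z :: t => pvTrip x y z ++ pvZig (y :: z :: t)
  | _ => []

def pvSign (a b : Int) : Int := if a < b then 1 else if b < a then -1 else 0

lemma pvSignB_eq (a b : Int) : pvSignB a b = pvSign a b := by
  unfold pvSignB pvSign; split_ifs <;> omega

lemma pvSign_lt {a b : Int} (h : a < b) : pvSign a b = 1 := by simp [pvSign, h]
lemma pvSign_gt {a b : Int} (h : b < a) : pvSign a b = -1 := by simp [pvSign, h, lt_asymm h]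
lemma pvSign_eq {a b : Int} (h : a = b) : pvSign a b = 0 := by simp [pvSign, h]

lemma pvPair_sign (x y z : Int) : pvPair (pvSign x y) (pvSign y z) = pvTrip x y z := by
  rcases lt_trichotomy x y with h1 | h1 | h1 <;> rcases lt_trichotomy y z with h2 | h2 | h2 <;>
    simp only [pvSign_lt, pvSign_gt, pvSign_eq, h1, h2] <;>
    simp only [pvPair] <;> norm_num <;> unfold pvTrip <;> split_ifs <;> first | rfl | omega

def pvSigns (xs : List Int) : List Int :=
  (xs.zip xs.tail).map (fun p => pvSign p.1 p.2)

lemma pvSigns_cons (x y : Int) (t : List Int) :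
    pvSigns (x :: y :: t) = pvSign x y :: pvSigns (y :: t) := by
  simp [pvSigns]

-- pair scan of a sign list
def pvScan (ss : List Int) : List Int :=
  (ss.zip ss.tail).flatMap (fun p => pvPair p.1 p.2)

lemma pvScan_cons (a b : Int) (t : List Int) :
    pvScan (a :: b :: t) = pvPair a b ++ pvScan (b :: t) := by
  simp [pvScan]

-- functional form of B's emit loop
def pvEmit : Int → List (Int × Int) → List Int
  | _, [] => []
  | prev, (s, k) :: rs =>
      (if prev ≠ 0 ∧ s ≠ 0 ∧ prev ≠ s then [1] else []) ++
      (if s = 1 then List.replicate (k - 1).toNat 0 else []) ++ pvEmit s rs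

lemma foldl_emit (rs : List (Int × Int)) (out : List Int) (prev : Int) :
    (rs.foldl
      (fun (st : List Int × Int) r =>
        let out1 := if st.2 ≠ 0 ∧ r.1 ≠ 0 ∧ st.2 ≠ r.1 then st.1 ++ [1] else st.1
        let out2 := if r.1 = 1 then out1 ++ List.replicate (r.2 - 1).toNat 0 else out1
        (out2, r.1)) (out, prev)).1 = out ++ pvEmit prev rs := by
  induction rs generalizing out prev with
  | nil => simp [pvEmit]
  | cons r rs ih =>
    obtain ⟨s, k⟩ := r
    simp only [List.foldl_cons, pvEmit, ih]
    split_ifs <;> simp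

lemma takeWhile_parts (x : Int) (t : List Int) :
    t.takeWhile (fun y => y == x) = List.replicate (t.takeWhile (fun y => y == x)).length x ∧
    t.drop (t.takeWhile (fun y => y == x)).length = t.dropWhile (fun y => y == x) ∧
    ∀ h : Int, (t.dropWhile (fun y => y == x)).head? = some h → h ≠ x := by
  induction t with
  | nil => simp
  | cons a t ih =>
    by_cases h : a = x
    · simpa [h, List.replicate_succ] using ih
    · simp [h]

lemma scan_replicate (x : Int) (m : Nat) (r : List Int) :
    pvScan (x :: (List.replicate m x ++ r)) =
      (if x = 1 then List.replicate m 0 else []) ++ pvScan (x :: r) := by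
  induction m with
  | zero => simp
  | succ m ih =>
    have h1 : pvPair x x = if x = 1 then [0] else [] := by
      unfold pvPair; split_ifs <;> simp_all
    rw [List.replicate_succ, List.cons_append, pvScan_cons, ih, h1]
    split_ifs <;> simp [List.replicate_succ]

lemma pvRle_cons (x : Int) (t : List Int) :
    pvRle (x :: t) = (x, 1 + ((t.takeWhile (fun y => y == x)).length : Int))
      :: pvRle (t.drop (t.takeWhile (fun y => y == x)).length) := by
  rw [pvRle]

lemma pvPair_ne (prev x : Int) (h : ¬(prev = 1 ∧ x = 1)) :
    pvPair prev x = (if prev ≠ 0 ∧ x ≠ 0 ∧ prev ≠ x then [1] else []) := by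
  unfold pvPair; split_ifs <;> simp_all

lemma emit_rle_fuel : ∀ (n : Nat) (ss : List Int), ss.length ≤ n → ∀ prev : Int,
    (prev = 1 → ss.head? ≠ some 1) → pvEmit prev (pvRle ss) = pvScan (prev :: ss) := by
  intro n
  induction n with
  | zero =>
    intro ss hss prev _
    have h0 : ss = [] := by cases ss <;> simp_all
    subst h0; simp [pvRle, pvEmit, pvScan]
  | succ n ih =>
    intro ss hss prev hprev
    match ss with
    | [] => simp [pvRle, pvEmit, pvScan]
    | x :: t =>
      obtain ⟨hrep, hdrop, hhead⟩ := takeWhile_parts x t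
      set L := (t.takeWhile (fun y => y == x)).length with hL
      have hdecomp : t = List.replicate L x ++ t.drop L := by
        conv_lhs => rw [← List.takeWhile_append_dropWhile (p := fun y => y == x) (l := t)]
        rw [hdrop]; exact congrArg (· ++ _) hrep
      have hne : ¬(prev = 1 ∧ x = 1) := by
        rintro ⟨h1, h2⟩
        exact hprev h1 (by simp [h2])
      have hih : pvEmit x (pvRle (t.drop L)) = pvScan (x :: t.drop L) := by
        apply ih
        · have ht : t.length ≤ n := by simpa using Nat.le_of_succ_le_succ hss
          calc (t.drop L).length ≤ t.length := by simp
            _ ≤ n := ht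
        · intro hx1 hh
          rw [hdrop] at hh
          exact hhead 1 hh hx1.symm
      rw [pvRle_cons, ← hL]
      simp only [pvEmit, hih]
      have hk : ((1 + (L : Int)) - 1).toNat = L := by omega
      rw [hk, pvScan_cons, pvPair_ne prev x hne]
      conv_rhs => rw [hdecomp, scan_replicate]
      rw [hdrop, List.append_assoc]

lemma emit_rle (ss : List Int) (prev : Int) (h : prev = 1 → ss.head? ≠ some 1) :
    pvEmit prev (pvRle ss) = pvScan (prev :: ss) :=
  emit_rle_fuel ss.length ss le_rfl prev h

lemma scan_signs (xs : List Int) : pvScan (pvSigns xs) = pvZig xs := by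
  match xs with
  | [] => rfl
  | [_] => rfl
  | [_, _] => rfl
  | x :: y :: z :: t =>
    have ih := scan_signs (y :: z :: t)
    rw [pvSigns_cons, pvSigns_cons, pvScan_cons, ← pvSigns_cons y z t, ih, pvPair_sign]
    rfl

lemma alt_eq_zig (xs : List Int) : solution_alt xs = pvZig xs := by
  unfold solution_alt
  have hsigns : (xs.zip (PySem.List.slice xs (some 1) none)).map (fun p => pvSignB p.1 p.2)
      = pvSigns xs := by
    simp [PySem.List.slice_from_one, pvSigns, pvSignB_eq]
  rw [hsigns, foldl_emit, List.nil_append,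
      emit_rle (pvSigns xs) 0 (by intro h; exact absurd h (by norm_num))]
  cases h : pvSigns xs with
  | nil => rw [← scan_signs, h]; rfl
  | cons a t =>
    rw [pvScan_cons, ← h, show pvPair 0 a = [] by simp [pvPair], List.nil_append, scan_signs]

lemma pvG_zero (x y z : Int) (t : List Int) : pvG (x :: y :: z :: t) 0 = pvTrip x y z := by
  have e1 : (0 : Int) + 1 = ((1 : Nat) : Int) := by norm_num
  have e2 : (0 : Int) + 2 = ((2 : Nat) : Int) := by norm_num
  unfold pvG
  rw [e1, e2, PySem.List.pyGetD_natCast, PySem.List.pyGetD_natCast]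
  simp [List.getD, PySem.List.pyGetD_zero_cons]

lemma pvG_cons (w : Int) (r : List Int) (k : Nat) : pvG (w :: r) ((k : Int) + 1) = pvG r k := by
  have r1 : (k : Int) + 1 = ((k + 1 : Nat) : Int) := by push_cast; ring
  have r2 : ((k + 1 : Nat) : Int) + 1 = ((k + 2 : Nat) : Int) := by push_cast; ring
  have r4 : ((k + 1 : Nat) : Int) + 2 = ((k + 3 : Nat) : Int) := by push_cast; ring
  have r5 : (k : Int) + 2 = ((k + 2 : Nat) : Int) := by push_cast; ring
  unfold pvG
  simp only [r1, r2, r4, r5, PySem.List.pyGetD_natCast, List.getD_cons_succ]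

lemma pvG_cons' (w : Int) (r : List Int) (i : Int) (h : 0 ≤ i) :
    pvG (w :: r) (i + 1) = pvG r i := by
  obtain ⟨k, rfl⟩ : ∃ k : Nat, i = (k : Int) := ⟨i.toNat, (Int.toNat_of_nonneg h).symm⟩
  exact pvG_cons w r k

lemma flatMap_pyRange_succ (f : Int → List Int) (m : Int) :
    (PySem.List.pyRange 1 (m + 1) 1).flatMap f
      = (PySem.List.pyRange 0 m 1).flatMap (fun i => f (i + 1)) := by
  rw [PySem.List.pyRange_one, PySem.List.pyRange_one]
  have h2 : (m + 1 - 1 : Int) = m - 0 := by ring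
  rw [h2]
  simp only [List.flatMap_map]
  exact List.flatMap_congr (fun k _ => by norm_num [add_comm])

lemma flat_eq_zig (xs : List Int) :
    (PySem.List.pyRange 0 ((xs.length : Int) - 2) 1).flatMap (pvG xs) = pvZig xs := by
  match xs with
  | [] => rw [PySem.List.pyRange_one_eq_nil (by norm_num)]; rfl
  | [_] => rw [PySem.List.pyRange_one_eq_nil (by norm_num)]; rfl
  | [_, _] => rw [PySem.List.pyRange_one_eq_nil (by norm_num)]; rfl
  | x :: y :: z :: t =>
    have hlen : ((x :: y :: z :: t).length : Int) - 2 = (t.length : Int) + 1 := by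
      simp; omega
    rw [hlen, PySem.List.pyRange_one_cons (by omega), List.flatMap_cons, zero_add, pvG_zero,
        flatMap_pyRange_succ]
    rw [List.flatMap_congr
        (fun i hi => pvG_cons' x (y :: z :: t) i (PySem.List.mem_pyRange_one.mp hi).1)]
    have ih := flat_eq_zig (y :: z :: t)
    have hlen2 : ((y :: z :: t).length : Int) - 2 = (t.length : Int) := by simp; omega
    rw [hlen2] at ih
    rw [show pvZig (x :: y :: z :: t) = pvTrip x y z ++ pvZig (y :: z :: t) from rfl, ih]

lemma solution_eq_flat (xs : List Int) :
    solution xs = (PySem.List.pyRange 0 ((xs.length : Int) - 2) 1).flatMap (pvG xs) := by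
  have hfun : (fun (result : List Int) (i : Int) =>
      if PySem.List.pyGetD xs i 0 < PySem.List.pyGetD xs (i + 1) 0 ∧
         PySem.List.pyGetD xs (i + 2) 0 < PySem.List.pyGetD xs (i + 1) 0 then result ++ [1]
      else if PySem.List.pyGetD xs (i + 1) 0 < PySem.List.pyGetD xs i 0 ∧
              PySem.List.pyGetD xs (i + 1) 0 < PySem.List.pyGetD xs (i + 2) 0 then result ++ [1]
      else if PySem.List.pyGetD xs i 0 < PySem.List.pyGetD xs (i + 1) 0 ∧
              PySem.List.pyGetD xs (i + 1) 0 < PySem.List.pyGetD xs (i + 2) 0 then result ++ [0]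
      else result)
      = fun result i => result ++ pvG xs i := by
    funext result i; simp only [pvG, pvTrip]; split_ifs <;> simp
  unfold solution
  rw [hfun, PySem.List.foldl_append_eq_flatMap]
  simp [PySem.List.len]

-- ===== VERDICT (by name: the statement is the Claim_ definition above) =====
theorem solution_spec : Claim_equal_solution := by
  intro numbers _
  unfold Spec_solution
  rw [solution_eq_flat, flat_eq_zig, alt_eq_zig]
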